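-- pv_equiv track=rewrite | github.com/leoswaldo/Non-acm.tju-problems | License Plate/license_plate.py | find_coincidences
-- ===== SOURCE A (Python) =====
-- def find_coincidences(license_plate, words_list):
--     '''
--     find all coicidences of characters in the words_list of the
--     license plate, except for dashes and return the number of coincidences
--     in the fastest way (not case sensitive)
--     '''
--
--     # remove all dashes '-' from license_plate
--     license_plate = license_plate.replace('-', '')
--
--     '''
--     We are going to iterate through all chars of the license_plate and if we
--     dont find the char in the word from the list, then remove it to save time
--     for next iteration (thats the magic of this algorithm, since we remove it
--     every time we dont find an element so there is not need to keep looking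
--     in it)
--     '''
--     for char in license_plate:
--         char = char.lower()
--         words_pending = len(words_list)
--         while(words_pending > 0):
--             if(not char in words_list[words_pending - 1].lower()):
--                 # remove the word in the list if char not found
--                 words_list.pop(words_pending - 1)
--             words_pending -= 1
--
--     return len(words_list)
-- ===== SOURCE B (Python) =====
-- def find_coincidences(license_plate, words_list):
--     # word-major single pass; slice assignment reproduces A's in-place mutation
--     plate = license_plate.replace('-', '').lower()
--     words_list[:] = [w for w in words_list
--                      if all(c in w.lower() for c in plate)]
--     return len(words_list)
-- ===== Notes on version B (the rewrite author's own statement) =====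
-- stated objective: simpler
-- what changed: Char-major repeated scans over a shrinking list (outer loop over plate chars, inner index loop popping words) replaced by one word-major short-circuiting pass: precompute the dash-free lowered plate once and keep each word iff it contains all plate chars, written back in place.
import Mathlib
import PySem

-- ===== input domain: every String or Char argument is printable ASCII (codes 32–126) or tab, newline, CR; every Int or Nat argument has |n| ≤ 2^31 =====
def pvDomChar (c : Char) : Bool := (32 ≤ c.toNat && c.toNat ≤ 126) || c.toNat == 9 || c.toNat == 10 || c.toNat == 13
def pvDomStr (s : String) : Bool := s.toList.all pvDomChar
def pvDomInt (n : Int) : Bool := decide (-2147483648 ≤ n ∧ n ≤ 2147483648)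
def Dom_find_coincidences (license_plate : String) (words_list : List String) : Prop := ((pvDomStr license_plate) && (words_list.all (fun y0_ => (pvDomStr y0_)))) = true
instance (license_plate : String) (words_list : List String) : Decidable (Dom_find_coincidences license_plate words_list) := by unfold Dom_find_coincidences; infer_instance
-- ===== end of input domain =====

-- B replaces A's char-major repeated scans of a shrinking list with one word-major pass
-- (objective: simpler). A mutates words_list in place; B reproduces the mutation via slice
-- assignment, and the equivalence proved here is about the RETURN value only.

-- ===== PORT A =====
-- 'char in s' for a single character char: ported as PySem.Chars.isIn [c] s (exact).
-- the inner 'while words_pending > 0' loop, recursing on words_pending; the index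
-- words_pending-1 is always in range, the .getD fallbacks are never taken.
def pvWhileA (c : Char) : Nat → List String → List String
  | 0, ws => ws
  | n + 1, ws =>
      let w := (PySem.List.pyGet? ws (n : Int)).getD ""            -- words_list[words_pending-1]
      let ws' := if ¬ PySem.Chars.isIn [c] (PySem.Str.lower w).toList then
                   ((PySem.List.pop? ws (n : Int)).map Prod.snd).getD ws   -- words_list.pop(...)
                 else ws
      pvWhileA c n ws'

def find_coincidences (license_plate : String) (words_list : List String) : Int :=
  let lp := PySem.Str.replace license_plate "-" ""
  let ws := lp.toList.foldl (fun ws ch =>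
      let c := PySem.Chars.lowerChar ch      -- char = char.lower()
      pvWhileA c ws.length ws) words_list    -- words_pending = len(words_list); while ...
  (ws.length : Int)

-- ===== PORT B =====
def find_coincidences_alt (license_plate : String) (words_list : List String) : Int :=
  let plate := PySem.Str.lower (PySem.Str.replace license_plate "-" "")
  let kept := words_list.filter (fun w =>
      plate.toList.all (fun c => PySem.Chars.isIn [c] (PySem.Str.lower w).toList))
  (kept.length : Int)

-- ===== PRECONDITION & SPEC =====
def Spec_find_coincidences (license_plate : String) (words_list : List String) (out : Int) : Prop := out = find_coincidences_alt license_plate words_list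
instance (license_plate : String) (words_list : List String) (out : Int) : Decidable (Spec_find_coincidences license_plate words_list out) := by unfold Spec_find_coincidences; infer_instance

-- ===== CLAIM (what is proved, stated in full; the proofs are below) =====
def Claim_equal_find_coincidences : Prop := ∀ (license_plate : String) (words_list : List String), Dom_find_coincidences license_plate words_list → Spec_find_coincidences license_plate words_list (find_coincidences license_plate words_list)

-- ===== LEMMAS AND PROOFS =====

-- the word-keeping predicate shared by the two analyses
def pvKeep (c : Char) (w : String) : Bool := PySem.Chars.isIn [c] (PySem.Str.lower w).toList

-- one full inner while-loop pass = a filter of the processed prefix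
theorem pvWhileA_eq_filter (c : Char) :
    ∀ (n : Nat) (ws : List String), n ≤ ws.length →
      pvWhileA c n ws = (ws.take n).filter (pvKeep c) ++ ws.drop n := by
  intro n
  induction n with
  | zero => intro ws _; simp [pvWhileA]
  | succ n ih =>
    intro ws h
    have hn : n < ws.length := by omega
    have htake : ws.take (n + 1) = ws.take n ++ [ws[n]] := by
      rw [List.take_add_one, List.getElem?_eq_getElem hn]; rfl
    have hdrop : ws.drop n = ws[n] :: ws.drop (n + 1) := List.drop_eq_getElem_cons hn
    rw [pvWhileA]
    simp only [PySem.List.pyGet?_natCast, List.getElem?_eq_getElem hn, Option.getD_some]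
    by_cases hp : PySem.Chars.isIn [c] (PySem.Str.lower ws[n]).toList
    · rw [if_neg (fun hc => hc hp)]
      rw [ih ws (by omega), htake, hdrop, List.filter_append]
      have hk : pvKeep c ws[n] = true := hp
      simp only [List.filter_cons, hk, if_true, List.filter_nil]
      simp [List.append_assoc]
    · rw [if_pos hp]
      rw [PySem.List.pop?_natCast (h := hn)]
      simp only [Option.map_some, Option.getD_some]
      have he : ws.eraseIdx n = ws.take n ++ ws.drop (n + 1) := List.eraseIdx_eq_take_drop_succ ws n
      rw [he]
      have hlt : n ≤ (ws.take n).length := by simp [List.length_take]; omega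
      rw [ih _ (by simp [List.length_take]; omega)]
      have htt : (ws.take n ++ ws.drop (n + 1)).take n = ws.take n := by
        rw [List.take_append_of_le_length hlt, List.take_take]; simp
      have hdd : (ws.take n ++ ws.drop (n + 1)).drop n = ws.drop (n + 1) := by
        rw [List.drop_append_of_le_length hlt]
        have : (ws.take n).drop n = [] := by
          apply List.drop_eq_nil_of_le; simp [List.length_take]
        rw [this]; rfl
      rw [htt, hdd, htake, List.filter_append]
      have hk : pvKeep c ws[n] = false := by simpa [pvKeep] using hp
      simp [hk]

-- the whole char-major fold = one word-major filter over the same characters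
theorem pvFold_eq_filter :
    ∀ (cs : List Char) (ws : List String),
      cs.foldl (fun ws ch => pvWhileA (PySem.Chars.lowerChar ch) ws.length ws) ws
        = ws.filter (fun w => cs.all (fun ch => pvKeep (PySem.Chars.lowerChar ch) w)) := by
  intro cs
  induction cs with
  | nil => intro ws; simp
  | cons ch rest ih =>
    intro ws
    rw [List.foldl_cons, pvWhileA_eq_filter _ ws.length ws (le_refl _)]
    simp only [List.take_length, List.drop_length, List.append_nil]
    rw [ih]
    rw [List.filter_filter]
    apply List.filter_congr
    intro w _
    simp [Bool.and_comm]

-- ===== VERDICT (by name: the statement is the Claim_ definition above) =====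
theorem find_coincidences_spec : Claim_equal_find_coincidences := by
  intro license_plate words_list _
  unfold Spec_find_coincidences
  show (((PySem.Str.replace license_plate "-" "").toList.foldl
      (fun ws ch => pvWhileA (PySem.Chars.lowerChar ch) ws.length ws) words_list).length : Int)
    = find_coincidences_alt license_plate words_list
  rw [pvFold_eq_filter]
  show _ = ((words_list.filter (fun w =>
      (PySem.Str.lower (PySem.Str.replace license_plate "-" "")).toList.all
        (fun c => PySem.Chars.isIn [c] (PySem.Str.lower w).toList))).length : Int)
  have hfil : List.filter (fun w => (PySem.Str.replace license_plate "-" "").toList.all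
        (fun ch => pvKeep (PySem.Chars.lowerChar ch) w)) words_list
      = List.filter (fun w => (PySem.Str.lower (PySem.Str.replace license_plate "-" "")).toList.all
        (fun c => PySem.Chars.isIn [c] (PySem.Str.lower w).toList)) words_list := by
    apply List.filter_congr
    intro w _
    rw [PySem.Str.toList_lower]
    simp only [PySem.Chars.lower, List.all_map, pvKeep, Function.comp_def]
  rw [hfil]
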